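-- pv_equiv track=rewrite | github.com/caicedogamer/FotmobScraper | bot.py | _pick_stats
-- ===== SOURCE A (Python) =====
-- def _pick_stats(stats: dict) -> dict:
--     """Pull out the most interesting attacking/performance stats."""
--     priority = [
--         "Goals", "Assists", "Goal contributions", "Expected goals (xG)",
--         "Expected assists (xA)", "Shots", "Shots on target", "Key passes",
--         "Successful dribbles", "Accurate passes", "Tackles won",
--         "Interceptions", "Clearances", "Saves", "Clean sheets",
--         "Minutes played", "Matches played", "Rating",
--     ]
--     ordered = {}
--     for p in priority:
--         for k, v in stats.items():
--             if k.lower() == p.lower() and k not in ordered: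
--                 ordered[k] = v
--     for k, v in stats.items():
--         if k not in ordered:
--             ordered[k] = v
--     return ordered
-- ===== SOURCE B (Python) =====
-- def _pick_stats(stats: dict) -> dict:
--     """Pull out the most interesting attacking/performance stats."""
--     priority = [
--         "Goals", "Assists", "Goal contributions", "Expected goals (xG)",
--         "Expected assists (xA)", "Shots", "Shots on target", "Key passes",
--         "Successful dribbles", "Accurate passes", "Tackles won",
--         "Interceptions", "Clearances", "Saves", "Clean sheets",
--         "Minutes played", "Matches played", "Rating",
--     ]
--     wanted = {p.lower() for p in priority}
--     groups = {}
--     rest = []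
--     for k, v in stats.items():
--         lk = k.lower()
--         if lk in wanted:
--             groups.setdefault(lk, []).append((k, v))
--         else:
--             rest.append((k, v))
--     out = []
--     for p in priority:
--         out.extend(groups.get(p.lower(), []))
--     out.extend(rest)
--     return dict(out)
-- ===== Notes on version B (the rewrite author's own statement) =====
-- stated objective: faster
-- what changed: Instead of rescanning the whole stats dict once per priority name (18 passes) plus a leftover pass, B makes a single pass over stats grouping items into buckets keyed by lowercased name (plus a rest list), then emits the buckets in priority order followed by the rest.
import Mathlib
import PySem

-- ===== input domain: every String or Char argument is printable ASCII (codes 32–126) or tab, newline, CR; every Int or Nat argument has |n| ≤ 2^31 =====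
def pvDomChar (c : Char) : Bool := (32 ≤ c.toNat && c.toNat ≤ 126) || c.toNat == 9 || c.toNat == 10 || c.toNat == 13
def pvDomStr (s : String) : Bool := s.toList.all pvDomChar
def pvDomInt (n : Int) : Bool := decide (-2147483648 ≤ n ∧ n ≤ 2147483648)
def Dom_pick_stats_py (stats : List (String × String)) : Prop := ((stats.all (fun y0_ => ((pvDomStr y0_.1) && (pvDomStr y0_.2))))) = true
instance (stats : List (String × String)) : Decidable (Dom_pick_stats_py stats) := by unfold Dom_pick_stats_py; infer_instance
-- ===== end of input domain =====

-- B replaces A's one-pass-per-priority rescans of the stats dict (18 passes) by a single grouping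
-- pass (a dict of buckets keyed by lowercased name) plus one pass over the priority list: simpler
-- single-scan structure.

-- ===== PORT A =====
def pvPriority : List String :=
  ["Goals", "Assists", "Goal contributions", "Expected goals (xG)",
   "Expected assists (xA)", "Shots", "Shots on target", "Key passes",
   "Successful dribbles", "Accurate passes", "Tackles won",
   "Interceptions", "Clearances", "Saves", "Clean sheets",
   "Minutes played", "Matches played", "Rating"]

-- 'ordered[k] = v' is always guarded by 'k not in ordered', so the dict insert appends:
-- ordered is kept as its item list, 'k in ordered' tested on the key column.
def pick_stats_py (stats : List (String × String)) : List (String × String) :=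
  let ordered := pvPriority.foldl (fun ordered p =>
      stats.foldl (fun a kv =>
        if (PySem.Str.lower kv.1 == PySem.Str.lower p) && !(a.any (fun e => e.1 == kv.1))
        then a ++ [kv] else a) ordered) []
  stats.foldl (fun a kv =>
    if !(a.any (fun e => e.1 == kv.1)) then a ++ [kv] else a) ordered

-- ===== PORT B =====
def pvWanted : PySem.Set String := PySem.Set.ofList (pvPriority.map PySem.Str.lower)

-- 'groups.setdefault(lk, []).append((k, v))' is 'groups[lk] = groups.get(lk, []) + [(k, v)]',
-- i.e. Dict.modify; the two accumulators (groups, rest) are a pair. dict(out) has unique keys,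
-- so it is the list 'out' itself.
def pick_stats_py_alt (stats : List (String × String)) : List (String × String) :=
  let gr := stats.foldl (fun gr kv =>
      if PySem.Set.contains pvWanted (PySem.Str.lower kv.1)
      then (gr.1.modify (PySem.Str.lower kv.1) [] (fun l => l ++ [kv]), gr.2)
      else (gr.1, gr.2 ++ [kv]))
      ((PySem.Dict.empty : PySem.Dict String (List (String × String))), ([] : List (String × String)))
  let out := pvPriority.foldl (fun out p => out ++ gr.1.getD (PySem.Str.lower p) []) []
  out ++ gr.2

-- ===== PRECONDITION & SPEC =====
-- The Python argument is a dict, whose keys are necessarily distinct; an association list with a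
-- repeated key represents no dict, so Pre_ requires the keys to be pairwise distinct.
def Pre_pick_stats_py (stats : List (String × String)) : Prop := (stats.map Prod.fst).Nodup
instance (stats : List (String × String)) : Decidable (Pre_pick_stats_py stats) := by unfold Pre_pick_stats_py; infer_instance
def pvWitness_pick_stats_py : (List (String × String)) := [("Shots", "5"), ("GOALS", "2"), ("Fouls", "1")]

def Spec_pick_stats_py (stats : List (String × String)) (out : List (String × String)) : Prop := out = pick_stats_py_alt stats
instance (stats : List (String × String)) (out : List (String × String)) : Decidable (Spec_pick_stats_py stats out) := by unfold Spec_pick_stats_py; infer_instance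

-- ===== CLAIM (what is proved, stated in full; the proofs are below) =====
def Claim_equal_pick_stats_py : Prop := ∀ (stats : List (String × String)), Dom_pick_stats_py stats → Pre_pick_stats_py stats → Spec_pick_stats_py stats (pick_stats_py stats)

-- ===== LEMMAS AND PROOFS =====

-- A's append-if-unseen loop: with pairwise-distinct keys, the growing membership test reduces to a
-- filter against the initial accumulator.
theorem pv_fold_cond (q : String × String → Bool) :
    ∀ (l acc : List (String × String)), (l.map Prod.fst).Nodup →
    l.foldl (fun a kv => if q kv && !(a.any (fun e => e.1 == kv.1)) then a ++ [kv] else a) acc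
      = acc ++ l.filter (fun kv => q kv && !(acc.any (fun e => e.1 == kv.1))) := by
  intro l
  induction l with
  | nil => intro acc _; simp
  | cons kv t ih =>
    intro acc hnd
    simp only [List.map_cons, List.nodup_cons] at hnd
    obtain ⟨hk, hnd⟩ := hnd
    by_cases hc : (q kv && !(acc.any (fun e => e.1 == kv.1))) = true
    · simp only [List.foldl_cons, List.filter_cons, hc]
      rw [ih _ hnd]
      rw [List.filter_congr (l := t)
        (q := fun kv' => q kv' && !(acc.any (fun e => e.1 == kv'.1)))]
      · simp
      · intro x hx
        have hne : (kv.1 == x.1) = false := by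
          simp only [beq_eq_false_iff_ne, ne_eq]
          intro h; exact hk (h ▸ List.mem_map_of_mem hx)
        simp [List.any_append, hne]
    · simp only [List.foldl_cons, List.filter_cons, hc]
      simp only [Bool.not_eq_true] at hc
      rw [ih _ hnd]
      simp

-- A's final leftover pass is the q = true instance.
theorem pv_fold_true :
    ∀ (l acc : List (String × String)), (l.map Prod.fst).Nodup →
    l.foldl (fun a kv => if !(a.any (fun e => e.1 == kv.1)) then a ++ [kv] else a) acc
      = acc ++ l.filter (fun kv => !(acc.any (fun e => e.1 == kv.1))) := by
  intro l acc h
  have := pv_fold_cond (fun _ => true) l acc h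
  simpa using this

-- A's outer loop over the priority list is a flatMap of filters (priority lowercase names are
-- pairwise distinct, so an item placed for one priority never matches another).
theorem pv_A_outer :
    ∀ (ps : List String) (stats acc : List (String × String)),
    (stats.map Prod.fst).Nodup →
    (ps.map PySem.Str.lower).Nodup →
    (∀ kv ∈ stats, ∀ p ∈ ps, PySem.Str.lower kv.1 = PySem.Str.lower p → kv.1 ∉ acc.map Prod.fst) →
    ps.foldl (fun ordered p =>
        stats.foldl (fun a kv =>
          if (PySem.Str.lower kv.1 == PySem.Str.lower p) && !(a.any (fun e => e.1 == kv.1))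
          then a ++ [kv] else a) ordered) acc
      = acc ++ ps.flatMap (fun p => stats.filter (fun kv => PySem.Str.lower kv.1 == PySem.Str.lower p)) := by
  intro ps
  induction ps with
  | nil => intro stats acc _ _ _; simp
  | cons p ps ih =>
    intro stats acc hnd hps hacc
    simp only [List.map_cons, List.nodup_cons] at hps
    obtain ⟨hp, hps⟩ := hps
    simp only [List.foldl_cons, List.flatMap_cons]
    rw [pv_fold_cond (fun kv => PySem.Str.lower kv.1 == PySem.Str.lower p) stats acc hnd]
    have hfilter : stats.filter (fun kv => (PySem.Str.lower kv.1 == PySem.Str.lower p)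
          && !(acc.any (fun e => e.1 == kv.1)))
        = stats.filter (fun kv => PySem.Str.lower kv.1 == PySem.Str.lower p) := by
      apply List.filter_congr
      intro x hx
      by_cases hq : PySem.Str.lower x.1 = PySem.Str.lower p
      · have hnm : x.1 ∉ acc.map Prod.fst := hacc x hx p (List.mem_cons_self ..) hq
        have : acc.any (fun e => e.1 == x.1) = false := by
          rw [List.any_eq_false]
          intro e he hee
          exact hnm (List.mem_map.mpr ⟨e, he, beq_iff_eq.mp hee⟩)
        simp [hq, this]
      · simp [hq]
    rw [hfilter]
    rw [ih stats _ hnd hps ?_]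
    · simp
    · intro kv hkv p' hp' hlow
      simp only [List.map_append, List.mem_append, not_or]
      constructor
      · exact hacc kv hkv p' (List.mem_cons_of_mem _ hp') hlow
      · intro hmem
        obtain ⟨kv', hkv', hfst⟩ := List.mem_map.mp hmem
        obtain ⟨hkv's, hq'⟩ := List.mem_filter.mp hkv'
        have heq : kv' = kv := List.inj_on_of_nodup_map hnd hkv's hkv hfst
        rw [heq] at hq'
        have h1 : PySem.Str.lower kv.1 = PySem.Str.lower p := by simpa using hq'
        exact hp (by rw [← h1, hlow]; exact List.mem_map_of_mem hp')

-- B's single pass: each wanted bucket collects exactly the items whose lowercased key is that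
-- bucket's key, and rest collects the unwanted items, both in stats order.
theorem pv_B_loop :
    ∀ (l : List (String × String)) (g : PySem.Dict String (List (String × String)))
      (r : List (String × String)),
    (∀ c, PySem.Set.contains pvWanted c = true →
        (l.foldl (fun gr kv =>
          if PySem.Set.contains pvWanted (PySem.Str.lower kv.1)
          then (gr.1.modify (PySem.Str.lower kv.1) [] (fun l => l ++ [kv]), gr.2)
          else (gr.1, gr.2 ++ [kv])) (g, r)).1.getD c []
          = g.getD c [] ++ l.filter (fun kv => PySem.Str.lower kv.1 == c))
    ∧ (l.foldl (fun gr kv =>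
          if PySem.Set.contains pvWanted (PySem.Str.lower kv.1)
          then (gr.1.modify (PySem.Str.lower kv.1) [] (fun l => l ++ [kv]), gr.2)
          else (gr.1, gr.2 ++ [kv])) (g, r)).2
        = r ++ l.filter (fun kv => !(PySem.Set.contains pvWanted (PySem.Str.lower kv.1))) := by
  intro l
  induction l with
  | nil => intro g r; simp
  | cons kv t ih =>
    intro g r
    by_cases hw : PySem.Set.contains pvWanted (PySem.Str.lower kv.1) = true
    · simp only [List.foldl_cons, List.filter_cons, hw, if_true, Bool.not_true, Bool.false_eq_true]
      constructor
      · intro c hc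
        rw [(ih _ r).1 c hc]
        by_cases hck : c = PySem.Str.lower kv.1
        · subst hck
          rw [PySem.Dict.getD_modify_self]
          simp
        · rw [PySem.Dict.getD_modify, if_neg hck]
          have hne : (PySem.Str.lower kv.1 == c) = false := by
            simp only [beq_eq_false_iff_ne, ne_eq]
            exact fun h => hck h.symm
          simp [hne]
      · rw [(ih _ r).2]
        simp
    · simp only [Bool.not_eq_true] at hw
      simp only [List.foldl_cons, List.filter_cons, hw, if_false, Bool.not_false,
        Bool.false_eq_true, if_true]
      constructor
      · intro c hc
        rw [(ih g _).1 c hc]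
        have hne : (PySem.Str.lower kv.1 == c) = false := by
          simp only [beq_eq_false_iff_ne, ne_eq]
          intro h; rw [h] at hw; rw [hw] at hc; exact Bool.false_ne_true hc
        simp [hne]
      · rw [(ih g _).2]
        simp

set_option maxHeartbeats 2000000 in
theorem pv_priority_lower_nodup : (pvPriority.map PySem.Str.lower).Nodup := by decide

-- ===== VERDICT (by name: the statement is the Claim_ definition above) =====
set_option maxHeartbeats 2000000 in
theorem pick_stats_py_spec : Claim_equal_pick_stats_py := by
  intro stats _hdom hpre
  unfold Spec_pick_stats_py
  unfold Pre_pick_stats_py at hpre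
  -- the common normal form: priority buckets then leftovers
  have hF := pv_A_outer pvPriority stats [] hpre pv_priority_lower_nodup (by simp)
  simp only [List.nil_append] at hF
  set F := pvPriority.flatMap
      (fun p => stats.filter (fun kv => PySem.Str.lower kv.1 == PySem.Str.lower p)) with hFdef
  -- key-membership in F vs membership of the lowered key in wanted
  have key : ∀ kv ∈ stats,
      (F.any (fun e => e.1 == kv.1)) = PySem.Set.contains pvWanted (PySem.Str.lower kv.1) := by
    intro kv hkv
    rw [Bool.eq_iff_iff]
    constructor
    · intro hany
      obtain ⟨e, heF, hee⟩ := List.any_eq_true.mp hany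
      obtain ⟨p, hp, hef⟩ := List.mem_flatMap.mp heF
      obtain ⟨hes, heq⟩ := List.mem_filter.mp hef
      have : e = kv := List.inj_on_of_nodup_map hpre hes hkv (beq_iff_eq.mp hee)
      rw [this] at heq
      have : PySem.Str.lower kv.1 ∈ pvPriority.map PySem.Str.lower :=
        List.mem_map.mpr ⟨p, hp, (beq_iff_eq.mp heq).symm⟩
      exact (PySem.Set.contains_iff _ _).mpr ((PySem.Set.mem_ofList _ _).mpr this)
    · intro hcon
      have := (PySem.Set.mem_ofList _ _).mp ((PySem.Set.contains_iff _ _).mp hcon)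
      obtain ⟨p, hp, hlp⟩ := List.mem_map.mp this
      apply List.any_eq_true.mpr
      refine ⟨kv, ?_, by simp⟩
      exact List.mem_flatMap.mpr ⟨p, hp,
        List.mem_filter.mpr ⟨hkv, beq_iff_eq.mpr hlp.symm⟩⟩
  -- A's value
  have hA : pick_stats_py stats
      = F ++ stats.filter (fun kv => !(PySem.Set.contains pvWanted (PySem.Str.lower kv.1))) := by
    show (stats.foldl (fun a kv =>
        if !(a.any (fun e => e.1 == kv.1)) then a ++ [kv] else a)
        (pvPriority.foldl (fun ordered p =>
          stats.foldl (fun a kv =>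
            if (PySem.Str.lower kv.1 == PySem.Str.lower p) && !(a.any (fun e => e.1 == kv.1))
            then a ++ [kv] else a) ordered) [])) = _
    rw [hF, pv_fold_true stats F hpre]
    congr 1
    apply List.filter_congr
    intro kv hkv
    rw [key kv hkv]
  -- B's value
  have hB := pv_B_loop stats PySem.Dict.empty []
  have hBv : pick_stats_py_alt stats
      = (pvPriority.flatMap (fun p =>
          (stats.foldl (fun gr kv =>
            if PySem.Set.contains pvWanted (PySem.Str.lower kv.1)
            then (gr.1.modify (PySem.Str.lower kv.1) [] (fun l => l ++ [kv]), gr.2)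
            else (gr.1, gr.2 ++ [kv]))
            ((PySem.Dict.empty : PySem.Dict String (List (String × String))), [])).1.getD
            (PySem.Str.lower p) []))
        ++ stats.filter (fun kv => !(PySem.Set.contains pvWanted (PySem.Str.lower kv.1))) := by
    show (pvPriority.foldl (fun out p => out ++ _) []) ++ _ = _
    rw [PySem.List.foldl_append_eq_flatMap, List.nil_append, hB.2, List.nil_append]
  rw [hA, hBv]
  congr 1
  apply List.flatMap_congr
  intro p hp
  have hc : PySem.Set.contains pvWanted (PySem.Str.lower p) = true :=
    (PySem.Set.contains_iff _ _).mpr ((PySem.Set.mem_ofList _ _).mpr (List.mem_map_of_mem hp))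
  rw [hB.1 (PySem.Str.lower p) hc, PySem.Dict.getD_empty, List.nil_append]
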